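-- pv_equiv track=rewrite | github.com/JT-LM/JT-DA-8B | src/util/str_op.py | code_run_result_parse
-- ===== SOURCE A (Python) =====
-- def code_run_result_parse(res_list):
--     res_str = ''
--     contain_img = False
--     for item in res_list:
--         if item['type'] == 'image_url' or item['type'] == 'file':
--             contain_img = True
--             break
--
--     for item in res_list:
--         if item['type'] == 'text' and not contain_img:
--             res_str += f"{item['text']}"
--         elif item['type'] == 'image_url':
--             res_str += f"Figure has been generated: \n{item['image_url']}\n"
--         elif item['type'] == 'file':
--             res_str += f"File has been generated: \n{item['file_url']}\n"
--     return res_str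
-- ===== SOURCE B (Python) =====
-- def code_run_result_parse(res_list):
--     media = ''
--     texts = []
--     for item in res_list:
--         t = item['type']
--         if t == 'image_url':
--             media += f"Figure has been generated: \n{item['image_url']}\n"
--         elif t == 'file':
--             media += f"File has been generated: \n{item['file_url']}\n"
--         elif t == 'text':
--             texts.append(item)
--     if media:
--         return media
--     return ''.join(f"{item['text']}" for item in texts)
-- ===== Notes on version B (the rewrite author's own statement) =====
-- stated objective: alternative
-- what changed: Replaces A's look-ahead contain_img scan plus a second flag-conditioned formatting pass with a single pass that builds the media output string and collects the text items, then selects media if non-empty else renders the collected texts.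
import Mathlib
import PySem

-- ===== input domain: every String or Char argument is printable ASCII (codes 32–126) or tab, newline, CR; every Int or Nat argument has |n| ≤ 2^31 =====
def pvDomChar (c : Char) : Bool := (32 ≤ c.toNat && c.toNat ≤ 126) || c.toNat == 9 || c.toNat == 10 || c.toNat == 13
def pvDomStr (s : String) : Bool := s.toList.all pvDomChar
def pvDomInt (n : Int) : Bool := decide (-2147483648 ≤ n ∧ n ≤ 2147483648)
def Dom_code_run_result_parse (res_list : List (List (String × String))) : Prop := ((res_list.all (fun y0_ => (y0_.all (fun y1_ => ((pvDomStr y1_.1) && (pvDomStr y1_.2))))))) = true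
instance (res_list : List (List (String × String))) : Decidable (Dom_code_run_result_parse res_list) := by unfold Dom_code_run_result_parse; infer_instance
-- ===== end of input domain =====

-- B replaces A's look-ahead contain_img flag plus a second fused formatting pass by one pass that
-- collects the media output string and the text items separately, then selects afterwards (alternative decomposition).


-- ===== PORT A =====
-- dict lookup item['k'] (first match; total form, exact under Pre_ which demands the key)
def pvLook (d : List (String × String)) (k : String) : String :=
  ((d.find? (fun p => p.1 == k)).map (·.2)).getD ""

def pvHasKey (d : List (String × String)) (k : String) : Bool :=
  (d.find? (fun p => p.1 == k)).isSome

-- body of A's second loop, with the precomputed contain_img flag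
def stepA (cI : Bool) (res_str : String) (item : List (String × String)) : String :=
  if pvLook item "type" = "text" ∧ cI = false then res_str ++ pvLook item "text"
  else if pvLook item "type" = "image_url" then
    res_str ++ "Figure has been generated: \n" ++ pvLook item "image_url" ++ "\n"
  else if pvLook item "type" = "file" then
    res_str ++ "File has been generated: \n" ++ pvLook item "file_url" ++ "\n"
  else res_str

def code_run_result_parse (res_list : List (List (String × String))) : String :=
  let contain_img := res_list.any
    (fun item => pvLook item "type" == "image_url" || pvLook item "type" == "file")
  res_list.foldl (stepA contain_img) ""

-- ===== PORT B =====
-- body of B's single pass: accumulate (media string, collected text items)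
def stepB (acc : String × List (List (String × String))) (item : List (String × String)) :
    String × List (List (String × String)) :=
  if pvLook item "type" = "image_url" then
    (acc.1 ++ "Figure has been generated: \n" ++ pvLook item "image_url" ++ "\n", acc.2)
  else if pvLook item "type" = "file" then
    (acc.1 ++ "File has been generated: \n" ++ pvLook item "file_url" ++ "\n", acc.2)
  else if pvLook item "type" = "text" then (acc.1, acc.2 ++ [item])
  else acc

def renderText (s : String) (item : List (String × String)) : String := s ++ pvLook item "text"

def code_run_result_parse_alt (res_list : List (List (String × String))) : String :=
  let p := res_list.foldl stepB ("", [])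
  if p.1 ≠ "" then p.1 else p.2.foldl renderText ""

-- ===== PRECONDITION & SPEC =====
-- Pre_ = exactly where Python A returns (no KeyError): every item has 'type'; media items have their
-- url key; and if no media item exists, every text item has 'text'.
def Pre_code_run_result_parse (res_list : List (List (String × String))) : Prop :=
  (∀ it ∈ res_list, pvHasKey it "type" = true) ∧
  (∀ it ∈ res_list, pvLook it "type" = "image_url" → pvHasKey it "image_url" = true) ∧
  (∀ it ∈ res_list, pvLook it "type" = "file" → pvHasKey it "file_url" = true) ∧
  ((∀ it ∈ res_list, pvLook it "type" ≠ "image_url" ∧ pvLook it "type" ≠ "file") →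
    ∀ it ∈ res_list, pvLook it "type" = "text" → pvHasKey it "text" = true)
instance (res_list : List (List (String × String))) : Decidable (Pre_code_run_result_parse res_list) := by
  unfold Pre_code_run_result_parse; infer_instance

def pvWitness_code_run_result_parse : (List (List (String × String))) :=
  [[("type", "text"), ("text", "hello")], [("type", "image_url"), ("image_url", "u.png")]]

def Spec_code_run_result_parse (res_list : List (List (String × String))) (out : String) : Prop := out = code_run_result_parse_alt res_list
instance (res_list : List (List (String × String))) (out : String) : Decidable (Spec_code_run_result_parse res_list out) := by unfold Spec_code_run_result_parse; infer_instance

-- ===== CLAIM (what is proved, stated in full; the proofs are below) =====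
def Claim_equal_code_run_result_parse : Prop := ∀ (res_list : List (List (String × String))), Dom_code_run_result_parse res_list → Pre_code_run_result_parse res_list → Spec_code_run_result_parse res_list (code_run_result_parse res_list)

-- ===== LEMMAS AND PROOFS =====

-- media-only projection of B's step (what stepB does to the first component)
def stepM (m : String) (item : List (String × String)) : String :=
  if pvLook item "type" = "image_url" then
    m ++ "Figure has been generated: \n" ++ pvLook item "image_url" ++ "\n"
  else if pvLook item "type" = "file" then
    m ++ "File has been generated: \n" ++ pvLook item "file_url" ++ "\n"
  else m

lemma foldl_stepB_eq (l : List (List (String × String))) :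
    ∀ m ts, l.foldl stepB (m, ts) =
      (l.foldl stepM m, ts ++ l.filter (fun it => pvLook it "type" == "text")) := by
  induction l with
  | nil => simp
  | cons it l ih =>
    intro m ts
    by_cases h1 : pvLook it "type" = "image_url"
    · simp [stepB, stepM, h1, ih]
    · by_cases h2 : pvLook it "type" = "file"
      · simp [stepB, stepM, h2, ih]
      · by_cases h3 : pvLook it "type" = "text"
        · simp [stepB, stepM, h3, ih]
        · simp [stepB, stepM, h1, h2, h3, ih]

lemma stepA_true_eq_stepM : stepA true = stepM := by
  funext m it
  simp [stepA, stepM]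

lemma length_le_foldl_stepM (l : List (List (String × String))) :
    ∀ m : String, m.length ≤ (l.foldl stepM m).length := by
  induction l with
  | nil => simp
  | cons it l ih =>
    intro m
    refine le_trans ?_ (ih (stepM m it))
    unfold stepM
    split_ifs <;> simp <;> omega
  
lemma foldl_stepM_ne_empty (l : List (List (String × String)))
    (h : ∃ it ∈ l, pvLook it "type" = "image_url" ∨ pvLook it "type" = "file") :
    ∀ m : String, l.foldl stepM m ≠ "" := by
  induction l with
  | nil => simp at h
  | cons it l ih =>
    intro m
    rcases h with ⟨jt, hmem, hj⟩
    rcases List.mem_cons.mp hmem with rfl | hmem'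
    · intro hc
      have hnl : (0:Nat) < "\n".length := by decide
      have hlt : m.length < (stepM m jt).length := by
        unfold stepM
        rcases hj with hj | hj <;> simp [hj] <;> omega
      have hle := length_le_foldl_stepM l (stepM m jt)
      rw [List.foldl_cons] at hc
      rw [hc] at hle
      rw [show ("" : String).length = 0 from rfl] at hle
      omega
    · exact ih ⟨jt, hmem', hj⟩ (stepM m it)

lemma foldl_stepM_no_media (l : List (List (String × String)))
    (h : ∀ it ∈ l, ¬(pvLook it "type" = "image_url" ∨ pvLook it "type" = "file")) :
    ∀ m : String, l.foldl stepM m = m := by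
  induction l with
  | nil => simp
  | cons it l ih =>
    intro m
    have hit := h it (List.mem_cons_self ..)
    rw [not_or] at hit
    rw [List.foldl_cons]
    have : stepM m it = m := by simp [stepM, hit.1, hit.2]
    rw [this]
    exact ih (fun jt hjt => h jt (List.mem_cons_of_mem _ hjt)) m

lemma foldl_stepA_false_eq (l : List (List (String × String)))
    (h : ∀ it ∈ l, ¬(pvLook it "type" = "image_url" ∨ pvLook it "type" = "file")) :
    ∀ s : String, l.foldl (stepA false) s =
      (l.filter (fun it => pvLook it "type" == "text")).foldl renderText s := by
  induction l with
  | nil => simp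
  | cons it l ih =>
    intro s
    have hit := h it (List.mem_cons_self ..)
    rw [not_or] at hit
    have ihl := ih (fun jt hjt => h jt (List.mem_cons_of_mem _ hjt))
    by_cases h3 : pvLook it "type" = "text"
    · simp [stepA, renderText, h3, ihl]
    · simp [stepA, hit.1, hit.2, h3, ihl]

-- ===== VERDICT (by name: the statement is the Claim_ definition above) =====
theorem code_run_result_parse_spec : Claim_equal_code_run_result_parse := by
  intro res_list _hdom _hpre
  unfold Spec_code_run_result_parse
  simp only [code_run_result_parse, code_run_result_parse_alt]
  rw [foldl_stepB_eq]
  cases h : res_list.any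
      (fun item => pvLook item "type" == "image_url" || pvLook item "type" == "file") with
  | true =>
    rw [stepA_true_eq_stepM]
    have hex : ∃ it ∈ res_list, pvLook it "type" = "image_url" ∨ pvLook it "type" = "file" := by
      rcases List.any_eq_true.mp h with ⟨it, hmem, hb⟩
      exact ⟨it, hmem, by simpa using hb⟩
    have hne := foldl_stepM_ne_empty res_list hex ""
    simp [hne]
  | false =>
    have hall : ∀ it ∈ res_list,
        ¬(pvLook it "type" = "image_url" ∨ pvLook it "type" = "file") := by
      intro it hmem
      have := List.any_eq_false.mp h it hmem
      simpa using this
    rw [foldl_stepM_no_media res_list hall]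
    simp [foldl_stepA_false_eq res_list hall]
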